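-- pv_equiv track=rewrite | github.com/mooham12314/GoogleFoobar | Level2/EnRouteSalute.py | ez
-- ===== SOURCE A (Python) =====
-- def ez(walk):
--     a=0
--     b=0
--     for i in walk:
--         if i == '<':
--             a += b
--         elif i == '>':
--             b += 1
--     a=a<<1
--     return a
-- ===== SOURCE B (Python) =====
-- def ez(walk):
--     total = 0
--     n = len(walk)
--     for i in range(n):
--         if walk[i] == '>':
--             for j in range(i + 1, n):
--                 if walk[j] == '<':
--                     total += 1
--     return total << 1
-- ===== Notes on version B (the rewrite author's own statement) =====
-- stated objective: alternative
-- what changed: Replaces A's single running-counter pass with explicit O(n^2) enumeration of ('>','<') index pairs: for each '>' it scans the suffix counting later '<' characters, then doubles the sum.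
import Mathlib
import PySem

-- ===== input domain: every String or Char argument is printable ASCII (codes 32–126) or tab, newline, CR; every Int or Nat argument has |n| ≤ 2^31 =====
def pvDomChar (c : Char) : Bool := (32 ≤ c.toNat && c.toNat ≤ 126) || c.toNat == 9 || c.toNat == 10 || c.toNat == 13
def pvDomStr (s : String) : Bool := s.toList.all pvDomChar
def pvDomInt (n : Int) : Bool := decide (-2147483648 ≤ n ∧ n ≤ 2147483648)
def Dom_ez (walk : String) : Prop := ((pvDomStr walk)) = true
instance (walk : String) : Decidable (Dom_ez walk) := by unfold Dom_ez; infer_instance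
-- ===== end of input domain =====

-- B replaces A's single running-counter pass by explicit nested enumeration of ('>','<') pairs (alternative decomposition, not faster).

-- ===== PORT A =====
-- one pass: a accumulates salute pairs, b counts '>' seen so far; 'a << 1' is 'a * 2'
def ez (walk : String) : Int :=
  let ab := walk.toList.foldl
    (fun (ab : Int × Int) i =>
      if i = '<' then (ab.1 + ab.2, ab.2)
      else if i = '>' then (ab.1, ab.2 + 1)
      else ab) (0, 0)
  ab.1 * 2

-- ===== PORT B =====
-- inner loop of Source B: count '<' in the suffix after a '>'
def ezAltInner : List Char → Int
  | [] => 0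
  | j :: rest => (if j = '<' then 1 else 0) + ezAltInner rest

-- outer loop of Source B: for each '>' add the '<'-count of its suffix
def ezAltOuter : List Char → Int
  | [] => 0
  | i :: rest => (if i = '>' then ezAltInner rest else 0) + ezAltOuter rest

def ez_alt (walk : String) : Int := ezAltOuter walk.toList * 2

-- ===== PRECONDITION & SPEC =====
def Spec_ez (walk : String) (out : Int) : Prop := out = ez_alt walk
instance (walk : String) (out : Int) : Decidable (Spec_ez walk out) := by unfold Spec_ez; infer_instance

-- ===== CLAIM (what is proved, stated in full; the proofs are below) =====
def Claim_equal_ez : Prop := ∀ (walk : String), Dom_ez walk → Spec_ez walk (ez walk)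

-- ===== LEMMAS AND PROOFS =====
-- loop invariant for A's fold: final a = a₀ + b₀·(number of '<' in rest) + crossing pairs of rest
theorem ez_fold_eq (l : List Char) : ∀ a b : Int,
    (l.foldl (fun (ab : Int × Int) i =>
      if i = '<' then (ab.1 + ab.2, ab.2)
      else if i = '>' then (ab.1, ab.2 + 1)
      else ab) (a, b)).1 = a + b * ezAltInner l + ezAltOuter l := by
  induction l with
  | nil => intro a b; simp [ezAltInner, ezAltOuter]
  | cons c rest ih =>
    intro a b
    by_cases h1 : c = '<'
    · simp [h1, List.foldl, ih, ezAltInner, ezAltOuter]; ring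
    · by_cases h2 : c = '>'
      · simp [h2, List.foldl, ih, ezAltInner, ezAltOuter]; ring
      · simp [h1, h2, List.foldl, ih, ezAltInner, ezAltOuter]

-- ===== VERDICT (by name: the statement is the Claim_ definition above) =====
theorem ez_spec : Claim_equal_ez := by
  intro walk _
  unfold Spec_ez ez ez_alt
  simp [ez_fold_eq]
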